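-- pv_equiv track=rewrite | github.com/error2403/advent-of-code | 2025/day 2/day2.py | find_invalid_ids2
-- ===== SOURCE A (Python) =====
-- from typing import List
--
-- def find_invalid_ids2(id_ranges: List[tuple[int, int]]) -> List[int]:
--     """run through the list of ID ranges and pull out any invalid IDs.
--         an invalid ID is one that is made only of some sequence of
--         digits repeated at least twice.
--
--         returns a list of invalid IDs"""
--
--     invalid_ids = []
--
--     # loop through each ID range
--     for id_range in id_ranges:
--
--         # loop through each ID in the range
--         for gift_id in range(id_range[0], id_range[1]+1):
--
--             # convert to string
--             id_str = str(gift_id)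
--             id_length = len(id_str)
--
--             # loop through all possible sequences (stop when it gets to half the len)
--             for seq_len in range(1, id_length//2 + 1):
--
--                 # check if original length can be perfectly divided by current sequence length
--                 if id_length % seq_len == 0:
--
--                     # create repeating sequence
--                     seq = id_str[:seq_len]
--
--                     # construct full sequence
--                     repeat_seq = seq * (id_length // seq_len)
--
--                     # check if sequence matches original ID
--                     if id_str == repeat_seq:
--                         # add invalid ID to list
--                         invalid_ids.append(gift_id)
--                         # break to avoid repeats
--                         break
--
--     return invalid_ids
-- ===== SOURCE B (Python) =====
-- from typing import List
--
--
-- def _is_repetition(s: str) -> bool: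
--     """True iff s is some block repeated at least twice.
--
--     A string of length L is such a repetition iff it is periodic with
--     period L // p for some prime factor p of L, so only the prime
--     factors of L (found by trial division) need to be tested."""
--     L = len(s)
--     n, p = L, 2
--     while p * p <= n:
--         if n % p == 0:
--             if s == s[:L // p] * p:
--                 return True
--             while n % p == 0:
--                 n //= p
--         p += 1
--     return n > 1 and s == s[:L // n] * n
--
--
-- def find_invalid_ids2(id_ranges: List[tuple[int, int]]) -> List[int]:
--     return [gift_id
--             for id_range in id_ranges
--             for gift_id in range(id_range[0], id_range[1] + 1)
--             if _is_repetition(str(gift_id))]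
-- ===== Notes on version B (the rewrite author's own statement) =====
-- stated objective: alternative
-- what changed: A scans every candidate block length 1..len//2 per ID with an early break; B is a flat comprehension whose repeated-block test trial-divides the ID's digit count and string-compares only the periods L//p for the prime factors p of L.
import Mathlib
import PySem

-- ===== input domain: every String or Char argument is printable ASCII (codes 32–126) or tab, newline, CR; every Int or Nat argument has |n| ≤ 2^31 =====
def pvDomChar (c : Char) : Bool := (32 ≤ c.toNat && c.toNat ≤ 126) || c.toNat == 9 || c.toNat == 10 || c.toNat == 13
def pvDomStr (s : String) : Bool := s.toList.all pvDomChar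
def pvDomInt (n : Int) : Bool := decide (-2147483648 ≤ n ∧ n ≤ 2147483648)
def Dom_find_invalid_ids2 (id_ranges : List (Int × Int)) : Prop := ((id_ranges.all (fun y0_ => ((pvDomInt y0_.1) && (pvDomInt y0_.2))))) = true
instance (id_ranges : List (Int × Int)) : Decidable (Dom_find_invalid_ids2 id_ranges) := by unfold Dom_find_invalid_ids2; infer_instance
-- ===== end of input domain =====

-- B replaces A's scan over every candidate block length (with a break) by a flat
-- comprehension whose repeated-block test trial-divides the length and checks only
-- the periods L//p for prime factors p of L (objective: alternative).

-- ===== PORT A =====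
-- inner 'for seq_len in range(1, id_length//2 + 1): … break' loop of A
def aInner (id_str : List Char) (id_length : Int) (gift_id : Int)
    (invalid_ids : List Int) : List Int → List Int
  | [] => invalid_ids
  | seq_len :: rest =>
    if PySem.Int.mod id_length seq_len = 0 then
      let seq := PySem.List.slice id_str none (some seq_len)
      let repeat_seq := PySem.List.pyRepeat seq (PySem.Int.floordiv id_length seq_len)
      if id_str = repeat_seq then invalid_ids ++ [gift_id]
      else aInner id_str id_length gift_id invalid_ids rest
    else aInner id_str id_length gift_id invalid_ids rest

def find_invalid_ids2 (id_ranges : List (Int × Int)) : List Int :=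
  id_ranges.foldl
    (fun invalid_ids id_range =>
      (PySem.List.pyRange id_range.1 (id_range.2 + 1) 1).foldl
        (fun invalid_ids gift_id =>
          let id_str := PySem.Int.toChars gift_id
          let id_length := PySem.Chars.len id_str
          aInner id_str id_length gift_id invalid_ids
            (PySem.List.pyRange 1 (PySem.Int.floordiv id_length 2 + 1) 1))
        invalid_ids)
    []

-- ===== PORT B =====
-- termination measure fact for pvStripFactor below
theorem pvStripDec (n p : Int) (h : 2 ≤ p ∧ 0 < n ∧ PySem.Int.mod n p = 0) :
    (PySem.Int.floordiv n p).toNat < n.toNat := by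
  rw [PySem.Int.floordiv_eq_ediv_of_pos (by omega)]
  have h1 : n / p < n := Int.ediv_lt_of_lt_mul (by omega) (by nlinarith [h.1, h.2.1])
  have h2 := Int.ediv_nonneg (le_of_lt h.2.1) (by omega : (0:Int) ≤ p)
  omega

-- 'while n % p == 0: n //= p' (the '2 ≤ p ∧ 0 < n' part of the guard only makes the
-- recursion well-founded; it holds at every reachable call)
def pvStripFactor (n p : Int) : Int :=
  if h : 2 ≤ p ∧ 0 < n ∧ PySem.Int.mod n p = 0 then
    pvStripFactor (PySem.Int.floordiv n p) p
  else n
termination_by n.toNat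
decreasing_by exact pvStripDec n p h

-- needed for pvTrial's termination
theorem pvStripFactor_le (n p : Int) : pvStripFactor n p ≤ n := by
  fun_induction pvStripFactor n p with
  | case1 n h ih =>
    have hpos := h.2.1
    have hfd : PySem.Int.floordiv n p ≤ n := by
      rw [PySem.Int.floordiv_eq_ediv_of_pos (by omega)]
      have := Int.ediv_le_self p (le_of_lt hpos)
      omega
    omega
  | case2 => omega

-- termination measure facts for pvTrial below
theorem pvTrialDec1 (n p : Int) (h : 2 ≤ p ∧ p * p ≤ n) :
    (pvStripFactor n p - (p + 1)).toNat < (n - p).toNat := by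
  have h1 := pvStripFactor_le n p
  have h2 : p < n := by nlinarith [h.1, h.2]
  omega

theorem pvTrialDec2 (n p : Int) (h : 2 ≤ p ∧ p * p ≤ n) :
    (n - (p + 1)).toNat < (n - p).toNat := by
  have h2 : p < n := by nlinarith [h.1, h.2]
  omega

-- the 'while p * p <= n: …' loop of B's _is_repetition (the '2 ≤ p' part of the
-- guard only makes the recursion well-founded; it holds at every reachable call)
def pvTrial (s : List Char) (L n p : Int) : Bool :=
  if h : 2 ≤ p ∧ p * p ≤ n then
    if PySem.Int.mod n p = 0 then
      if s = PySem.List.pyRepeat (PySem.List.slice s none (some (PySem.Int.floordiv L p))) p then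
        true
      else pvTrial s L (pvStripFactor n p) (p + 1)
    else pvTrial s L n (p + 1)
  else
    decide (1 < n) &&
      decide (s = PySem.List.pyRepeat (PySem.List.slice s none (some (PySem.Int.floordiv L n))) n)
termination_by (n - p).toNat
decreasing_by
  · exact pvTrialDec1 n p h
  · exact pvTrialDec2 n p h

def is_repetition (s : List Char) : Bool :=
  pvTrial s (PySem.Chars.len s) (PySem.Chars.len s) 2

def find_invalid_ids2_alt (id_ranges : List (Int × Int)) : List Int :=
  id_ranges.flatMap (fun id_range =>
    (PySem.List.pyRange id_range.1 (id_range.2 + 1) 1).filter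
      (fun gift_id => is_repetition (PySem.Int.toChars gift_id)))

-- ===== PRECONDITION & SPEC =====
def Spec_find_invalid_ids2 (id_ranges : List (Int × Int)) (out : List Int) : Prop := out = find_invalid_ids2_alt id_ranges
instance (id_ranges : List (Int × Int)) (out : List Int) : Decidable (Spec_find_invalid_ids2 id_ranges out) := by unfold Spec_find_invalid_ids2; infer_instance

-- ===== CLAIM (what is proved, stated in full; the proofs are below) =====
def Claim_equal_find_invalid_ids2 : Prop := ∀ (id_ranges : List (Int × Int)), Dom_find_invalid_ids2 id_ranges → Spec_find_invalid_ids2 id_ranges (find_invalid_ids2 id_ranges)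

-- ===== LEMMAS AND PROOFS =====

-- the Boolean test A applies to one candidate block length d
def pvCondA (s : List Char) (L d : Int) : Bool :=
  decide (PySem.Int.mod L d = 0) &&
    decide (s = PySem.List.pyRepeat (PySem.List.slice s none (some d)) (PySem.Int.floordiv L d))

-- the Propositional test B applies for one factor q of the length
def pvTest (s : List Char) (L q : Int) : Prop :=
  s = PySem.List.pyRepeat (PySem.List.slice s none (some (PySem.Int.floordiv L q))) q

-- 's is periodic with block length d'
def pvRep (s : List Char) (d : Nat) : Prop :=
  s = (List.replicate (s.length / d) (s.take d)).flatten

theorem aInner_any (s : List Char) (L g : Int) (acc : List Int) (ds : List Int) :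
    aInner s L g acc ds = if ds.any (pvCondA s L) then acc ++ [g] else acc := by
  induction ds with
  | nil => simp [aInner]
  | cons d rest ih =>
    rw [aInner, List.any_cons]
    by_cases h1 : PySem.Int.mod L d = 0
    · rw [if_pos h1]
      dsimp only
      by_cases h2 : s = PySem.List.pyRepeat (PySem.List.slice s none (some d))
          (PySem.Int.floordiv L d)
      · have hc : pvCondA s L d = true := by
          simp only [pvCondA, h1, decide_true, Bool.true_and]
          exact decide_eq_true h2
        rw [if_pos h2, hc]
        simp
      · have hc : pvCondA s L d = false := by
          simp only [pvCondA, h1, decide_true, Bool.true_and]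
          exact decide_eq_false h2
        rw [if_neg h2, ih, hc]
        simp
    · have hc : pvCondA s L d = false := by simp [pvCondA, h1]
      rw [if_neg h1, ih, hc]
      simp

theorem pvStripFactor_dvd (n p : Int) : pvStripFactor n p ∣ n := by
  fun_induction pvStripFactor n p with
  | case1 n h ih =>
    have hpd : p ∣ n := (PySem.Int.mod_eq_zero_iff_dvd n p).mp h.2.2
    obtain ⟨c, hc⟩ := hpd
    have hfd : PySem.Int.floordiv n p = c := by
      rw [PySem.Int.floordiv_eq_ediv_of_pos (by omega), hc,
        Int.mul_ediv_cancel_left c (by omega : p ≠ 0)]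
    rw [hfd] at ih ⊢
    exact ih.trans ⟨p, by rw [hc]; ring⟩
  | case2 => exact dvd_refl _

theorem pvStripFactor_pos (n p : Int) : 0 < n → 0 < pvStripFactor n p := by
  fun_induction pvStripFactor n p with
  | case1 n h ih =>
    intro hn
    apply ih
    obtain ⟨c, hc⟩ := (PySem.Int.mod_eq_zero_iff_dvd n p).mp h.2.2
    have hfd : PySem.Int.floordiv n p = c := by
      rw [PySem.Int.floordiv_eq_ediv_of_pos (by omega), hc,
        Int.mul_ediv_cancel_left c (by omega : p ≠ 0)]
    rw [hfd]
    nlinarith [h.1]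
  | case2 => exact fun hn => hn

theorem pvStripFactor_not_dvd (n p : Int) (hp : 2 ≤ p) : 0 < n → ¬ p ∣ pvStripFactor n p := by
  fun_induction pvStripFactor n p with
  | case1 n h ih =>
    intro hn
    apply ih
    obtain ⟨c, hc⟩ := (PySem.Int.mod_eq_zero_iff_dvd n p).mp h.2.2
    have hfd : PySem.Int.floordiv n p = c := by
      rw [PySem.Int.floordiv_eq_ediv_of_pos (by omega), hc,
        Int.mul_ediv_cancel_left c (by omega : p ≠ 0)]
    rw [hfd]
    nlinarith [h.1]
  | case2 n h =>
    intro hn hdvd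
    exact h ⟨hp, hn, (PySem.Int.mod_eq_zero_iff_dvd n p).mpr hdvd⟩

theorem pvStripFactor_dvd_of_prime (n p q : Int) (hq : Prime q) (hqp : ¬ q ∣ p) :
    q ∣ n → q ∣ pvStripFactor n p := by
  fun_induction pvStripFactor n p with
  | case1 n h ih =>
    intro hqn
    apply ih
    obtain ⟨c, hc⟩ := (PySem.Int.mod_eq_zero_iff_dvd n p).mp h.2.2
    have hfd : PySem.Int.floordiv n p = c := by
      rw [PySem.Int.floordiv_eq_ediv_of_pos (by omega), hc,
        Int.mul_ediv_cancel_left c (by omega : p ≠ 0)]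
    rw [hfd]
    rcases (hq.2.2 p c (hc ▸ hqn)) with hcase | hcase
    · exact absurd hcase hqp
    · exact hcase
  | case2 => exact fun hqn => hqn

-- the smallest divisor (at least 2) of a positive number is prime
theorem pvSmallestPrime (n p : Int) (hn : 0 < n) (hp2 : 2 ≤ p) (hdvd : p ∣ n)
    (hmin : ∀ r : Int, 2 ≤ r → r < p → ¬ r ∣ n) : p.toNat.Prime := by
  rw [Nat.prime_def_lt]
  refine ⟨by omega, fun m hm hmdvd => ?_⟩
  by_contra hne
  have hm0 : m ≠ 0 := by
    rintro rfl
    rw [zero_dvd_iff] at hmdvd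
    omega
  have hm2 : 2 ≤ m := by omega
  have hmp : (m : Int) ∣ p := by
    have h := Int.natCast_dvd_natCast.mpr hmdvd
    rwa [Int.toNat_of_nonneg (by omega : (0:Int) ≤ p)] at h
  refine hmin (m : Int) (by exact_mod_cast hm2) ?_ (hmp.trans hdvd)
  have : (m : Int) < (p.toNat : Int) := by exact_mod_cast hm
  rwa [Int.toNat_of_nonneg (by omega : (0:Int) ≤ p)] at this

-- a positive number below p² with no divisor in [2, p) is prime
theorem pvLeftoverPrime (n p : Int) (hn1 : 1 < n) (hp2 : 2 ≤ p) (hlt : n < p * p)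
    (hsmall : ∀ r : Int, 2 ≤ r → r < p → ¬ r ∣ n) : n.toNat.Prime := by
  rw [Nat.prime_def_lt]
  refine ⟨by omega, fun m hm hmdvd => ?_⟩
  by_contra hne
  have hm0 : m ≠ 0 := by
    rintro rfl
    rw [zero_dvd_iff] at hmdvd
    omega
  have hm2 : 2 ≤ m := by omega
  have hmi : (m : Int) ∣ n := by
    have h := Int.natCast_dvd_natCast.mpr hmdvd
    rwa [Int.toNat_of_nonneg (by omega : (0:Int) ≤ n)] at h
  have hmp : p ≤ (m : Int) :=
    le_of_not_gt fun hlt' => hsmall m (by exact_mod_cast hm2) hlt' hmi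
  obtain ⟨c, hc⟩ := hmi
  have hc0 : 0 < c := by nlinarith
  have hc1 : c ≠ 1 := by
    intro h
    rw [h, mul_one] at hc
    omega
  have hc2 : 2 ≤ c := by omega
  have hcdvd : c ∣ n := ⟨m, by rw [hc]; ring⟩
  have hcp : p ≤ c := le_of_not_gt fun hl => hsmall c hc2 hl hcdvd
  nlinarith

theorem pvTrial_iff (s : List Char) (L : Int) (n p : Int) :
    0 < n → n ∣ L → 2 ≤ p →
    (∀ r : Int, 2 ≤ r → r < p → ¬ r ∣ n) →
    (∀ q : Nat, q.Prime → (q : Int) ∣ L → (q : Int) < p → ¬ pvTest s L q) →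
    (∀ q : Nat, q.Prime → (q : Int) ∣ L → p ≤ (q : Int) → (q : Int) ∣ n) →
    (pvTrial s L n p = true ↔ ∃ q : Nat, q.Prime ∧ (q : Int) ∣ L ∧ pvTest s L q) := by
  induction n, p using pvTrial.induct s L with
  | case1 n p h hmod htest =>
    intro hn hd hp hsmall htested hbig
    rw [pvTrial, dif_pos h, if_pos hmod, if_pos htest]
    have hpn : (p.toNat : Int) = p := Int.toNat_of_nonneg (by omega)
    have hpdvd : p ∣ n := (PySem.Int.mod_eq_zero_iff_dvd n p).mp hmod
    have hprime : p.toNat.Prime := pvSmallestPrime n p hn hp hpdvd hsmall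
    refine iff_of_true rfl ⟨p.toNat, hprime, ?_, ?_⟩
    · rw [hpn]; exact hpdvd.trans hd
    · unfold pvTest; rw [hpn]; exact htest
  | case2 n p h hmod htest ih =>
    intro hn hd hp hsmall htested hbig
    rw [pvTrial, dif_pos h, if_pos hmod, if_neg htest]
    have hpdvd : p ∣ n := (PySem.Int.mod_eq_zero_iff_dvd n p).mp hmod
    have hprime : p.toNat.Prime := pvSmallestPrime n p hn hp hpdvd hsmall
    have hpn : (p.toNat : Int) = p := Int.toNat_of_nonneg (by omega)
    apply ih (pvStripFactor_pos n p hn) ((pvStripFactor_dvd n p).trans hd) (by omega)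
    · intro r h2 hlt hdvd
      rcases eq_or_lt_of_le (by omega : r ≤ p) with hr | hr
      · exact pvStripFactor_not_dvd n p (hr ▸ h2) hn (hr ▸ hdvd)
      · exact hsmall r h2 hr (hdvd.trans (pvStripFactor_dvd n p))
    · intro q hq hqL hlt ht
      rcases eq_or_lt_of_le (by omega : (q : Int) ≤ p) with hr | hr
      · apply htest
        unfold pvTest at ht
        rwa [hr] at ht
      · exact htested q hq hqL hr ht
    · intro q hq hqL hle
      have hqn := hbig q hq hqL (by omega)
      apply pvStripFactor_dvd_of_prime n p (q : Int) (Nat.prime_iff_prime_int.mp hq) ?_ hqn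
      intro hdvdp
      have := Int.le_of_dvd (by omega : (0:Int) < p) hdvdp
      omega
  | case3 n p h hmod ih =>
    intro hn hd hp hsmall htested hbig
    rw [pvTrial, dif_pos h, if_neg hmod]
    apply ih hn hd (by omega)
    · intro r h2 hlt hdvd
      rcases eq_or_lt_of_le (by omega : r ≤ p) with hr | hr
      · exact hmod ((PySem.Int.mod_eq_zero_iff_dvd n p).mpr (hr ▸ hdvd))
      · exact hsmall r h2 hr hdvd
    · intro q hq hqL hlt ht
      rcases eq_or_lt_of_le (by omega : (q : Int) ≤ p) with hr | hr
      · exact hmod ((PySem.Int.mod_eq_zero_iff_dvd n p).mpr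
          (hr ▸ hbig q hq hqL (le_of_eq hr.symm)))
      · exact htested q hq hqL hr ht
    · intro q hq hqL hle
      exact hbig q hq hqL (by omega)
  | case4 n p h =>
    intro hn hd hp hsmall htested hbig
    rw [pvTrial, dif_neg h]
    have hnp : n < p * p := by
      by_contra hc
      exact h ⟨hp, by omega⟩
    simp only [Bool.and_eq_true, decide_eq_true_eq]
    constructor
    · rintro ⟨hn1, ht⟩
      have hprime : n.toNat.Prime := pvLeftoverPrime n p hn1 hp hnp hsmall
      have hnn : (n.toNat : Int) = n := Int.toNat_of_nonneg (by omega)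
      refine ⟨n.toNat, hprime, ?_, ?_⟩
      · rw [hnn]; exact hd
      · unfold pvTest; rw [hnn]; exact ht
    · rintro ⟨q, hq, hqL, ht⟩
      have hq2 : (2:Int) ≤ (q : Int) := by exact_mod_cast hq.two_le
      have hpq : p ≤ (q : Int) := by
        by_contra hlt
        rw [not_le] at hlt
        exact htested q hq hqL hlt ht
      obtain ⟨c, hc⟩ := hbig q hq hqL hpq
      have hc0 : 0 < c := by nlinarith
      have hceq : c = 1 := by
        by_contra hc1
        have hc2 : 2 ≤ c := by omega
        have hcd : c ∣ n := ⟨q, by rw [hc]; ring⟩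
        have hcp : p ≤ c := le_of_not_gt fun hl => hsmall c hc2 hl hcd
        nlinarith
      have hnq : n = (q : Int) := by rw [hc, hceq, mul_one]
      refine ⟨by omega, ?_⟩
      unfold pvTest at ht
      rw [hnq]
      exact ht

theorem pvFlatRepLen (k : Nat) (w : List Char) :
    ((List.replicate k w).flatten).length = k * w.length := by
  simp only [List.length_flatten, List.map_replicate, List.sum_replicate, smul_eq_mul]

theorem pvFlatRepAdd (a b : Nat) (w : List Char) :
    (List.replicate (a + b) w).flatten =
      (List.replicate a w).flatten ++ (List.replicate b w).flatten := by
  rw [List.replicate_add, List.flatten_append]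

theorem pvFlatRepMul (a b : Nat) (w : List Char) :
    (List.replicate (a * b) w).flatten =
      (List.replicate a ((List.replicate b w).flatten)).flatten := by
  induction a with
  | zero => simp
  | succ a ih =>
    rw [List.replicate_succ, List.flatten_cons, ← ih,
      show (a + 1) * b = b + a * b by ring, pvFlatRepAdd]

theorem pvRep_lift (s : List Char) (d e : Nat) (h0 : 0 < d) (hde : d ∣ e)
    (hel : e ∣ s.length) (h : pvRep s d) : pvRep s e := by
  rcases Nat.eq_zero_or_pos s.length with hl | hl
  · have hs : s = [] := List.eq_nil_of_length_eq_zero hl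
    subst hs
    simp [pvRep]
  · have he : 0 < e := Nat.pos_of_dvd_of_pos hel hl
    obtain ⟨m, hm⟩ := hde
    obtain ⟨nn, hnn⟩ := hel
    have hm0 : 0 < m := by nlinarith
    have hnn0 : 0 < nn := by nlinarith
    have hd_l : d ∣ s.length := Dvd.dvd.trans ⟨m, hm⟩ ⟨nn, hnn⟩
    have hdle : d ≤ s.length := Nat.le_of_dvd hl hd_l
    have hw : (s.take d).length = d := by
      rw [List.length_take]
      omega
    have hk : s.length / d = m * nn := by
      rw [hnn, hm, Nat.mul_assoc, Nat.mul_div_cancel_left _ h0]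
    have hrep : s = (List.replicate (m * nn) (s.take d)).flatten := by
      rw [← hk]; exact h
    have hsplit : s = (List.replicate m (s.take d)).flatten ++
        (List.replicate (m * nn - m) (s.take d)).flatten := by
      rw [← pvFlatRepAdd, show m + (m * nn - m) = m * nn by have := Nat.le_mul_of_pos_right m hnn0; omega]
      exact hrep
    have htake : s.take e = (List.replicate m (s.take d)).flatten := by
      conv_lhs => rw [hsplit]
      apply List.take_left'
      rw [pvFlatRepLen, hw, hm]
      ring
    have hle : s.length / e = nn := by
      rw [hnn, Nat.mul_div_cancel_left _ he]
    show s = (List.replicate (s.length / e) (s.take e)).flatten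
    rw [hle, htake, ← pvFlatRepMul, show nn * m = m * nn by ring, ← hrep]

theorem pvNatEquiv (s : List Char) (hl : 0 < s.length) :
    (∃ d : Nat, 0 < d ∧ 2 * d ≤ s.length ∧ d ∣ s.length ∧ pvRep s d) ↔
      (∃ q : Nat, q.Prime ∧ q ∣ s.length ∧ pvRep s (s.length / q)) := by
  constructor
  · rintro ⟨d, hd0, hd2, hddvd, hrep⟩
    obtain ⟨k, hk⟩ := hddvd
    have hk2 : 2 ≤ k := by nlinarith
    obtain ⟨q, hq, hqk⟩ := Nat.exists_prime_and_dvd (by omega : k ≠ 1)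
    obtain ⟨m, hmq⟩ := hqk
    have hlq : s.length / q = d * m := by
      rw [hk, hmq, show d * (q * m) = q * (d * m) by ring,
        Nat.mul_div_cancel_left _ hq.pos]
    refine ⟨q, hq, ⟨d * m, by rw [hk, hmq]; ring⟩, ?_⟩
    refine pvRep_lift s d (s.length / q) hd0 ⟨m, hlq.symm ▸ rfl⟩ ?_ hrep
    · exact ⟨q, by rw [hlq, hk, hmq]; ring⟩
  · rintro ⟨q, hq, hqdvd, hrep⟩
    obtain ⟨c, hc⟩ := hqdvd
    have hcq : s.length / q = c := by rw [hc, Nat.mul_div_cancel_left _ hq.pos]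
    refine ⟨s.length / q, ?_, ?_, Nat.div_dvd_of_dvd ⟨c, hc⟩, hrep⟩
    · rw [hcq]
      nlinarith [hq.two_le]
    · rw [hcq]
      nlinarith [hq.two_le]

theorem pvCondA_iff (s : List Char) (d : Int) (hd : 1 ≤ d) :
    pvCondA s (s.length : Int) d = true ↔ (d.toNat ∣ s.length ∧ pvRep s d.toNat) := by
  have hdn : ((d.toNat : Int)) = d := Int.toNat_of_nonneg (by omega)
  unfold pvCondA
  simp only [Bool.and_eq_true, decide_eq_true_eq]
  apply and_congr
  · rw [PySem.Int.mod_eq_zero_iff_dvd, ← hdn, Int.natCast_dvd_natCast,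
      Int.toNat_natCast]
  · rw [← hdn, PySem.Int.floordiv_eq_ediv_of_pos (by omega), ← Int.natCast_ediv,
      PySem.List.slice_to_natCast]
    unfold PySem.List.pyRepeat pvRep
    simp only [Int.toNat_natCast]

theorem pvTest_iff (s : List Char) (q : Nat) (hq : 0 < q) (hl : 0 < s.length)
    (hdvd : q ∣ s.length) :
    pvTest s (s.length : Int) (q : Int) ↔ pvRep s (s.length / q) := by
  unfold pvTest pvRep
  rw [PySem.Int.floordiv_eq_ediv_of_pos (by exact_mod_cast hq), ← Int.natCast_ediv,
    PySem.List.slice_to_natCast, Nat.div_div_self hdvd (by omega)]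
  unfold PySem.List.pyRepeat
  simp

theorem pvPointwise (s : List Char) :
    (PySem.List.pyRange 1 (PySem.Int.floordiv (PySem.Chars.len s) 2 + 1) 1).any
        (pvCondA s (PySem.Chars.len s)) = is_repetition s := by
  have hlen : PySem.Chars.len s = (s.length : Int) := rfl
  unfold is_repetition
  rw [hlen]
  rcases Nat.eq_zero_or_pos s.length with hl | hl
  · have hs : s = [] := List.eq_nil_of_length_eq_zero hl
    subst hs
    have h2 : PySem.Int.floordiv ((0:Nat) : Int) 2 = 0 := by
      rw [PySem.Int.floordiv_eq_ediv_of_pos (by omega)]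
      norm_num
    rw [show (([] : List Char).length : Int) = ((0:Nat) : Int) from rfl, h2]
    rw [PySem.List.pyRange_one_eq_nil (by omega)]
    rw [pvTrial, dif_neg (by omega)]
    simp
  · have hli : (0:Int) < (s.length : Int) := by exact_mod_cast hl
    have hinit := pvTrial_iff s (s.length : Int) (s.length : Int) 2
      hli dvd_rfl (by omega)
      (fun r h2 hlt _ => by omega)
      (fun q hq _ hlt => by
        have := hq.two_le
        exfalso
        omega)
      (fun q _ hqL _ => hqL)
    rw [Bool.eq_iff_iff, List.any_eq_true, hinit]
    have hfd : PySem.Int.floordiv (s.length : Int) 2 = (s.length : Int) / 2 :=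
      PySem.Int.floordiv_eq_ediv_of_pos (by omega)
    constructor
    · rintro ⟨d, hdmem, hdcond⟩
      rw [PySem.List.mem_pyRange_one, hfd] at hdmem
      obtain ⟨hdvd, hrep⟩ := (pvCondA_iff s d hdmem.1).mp hdcond
      obtain ⟨q, hq, hqdvd, hqrep⟩ := (pvNatEquiv s hl).mp
        ⟨d.toNat, by omega, by omega, hdvd, hrep⟩
      exact ⟨q, hq, by exact_mod_cast hqdvd, (pvTest_iff s q hq.pos hl hqdvd).mpr hqrep⟩
    · rintro ⟨q, hq, hqL, ht⟩
      have hqdvd : q ∣ s.length := by exact_mod_cast hqL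
      have hrep := (pvTest_iff s q hq.pos hl hqdvd).mp ht
      obtain ⟨d, hd0, hd2, hddvd, hdrep⟩ := (pvNatEquiv s hl).mpr ⟨q, hq, hqdvd, hrep⟩
      refine ⟨(d : Int), ?_, ?_⟩
      · rw [PySem.List.mem_pyRange_one, hfd]
        omega
      · exact (pvCondA_iff s (d : Int) (by exact_mod_cast hd0)).mpr
          ⟨by simpa using hddvd, by simpa using hdrep⟩

-- ===== VERDICT (by name: the statement is the Claim_ definition above) =====
theorem find_invalid_ids2_spec : Claim_equal_find_invalid_ids2 := by
  intro id_ranges _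
  unfold Spec_find_invalid_ids2 find_invalid_ids2 find_invalid_ids2_alt
  simp only [aInner_any, PySem.List.foldl_append_if_eq_filter,
    PySem.List.foldl_append_eq_flatMap, List.nil_append]
  congr 1
  funext id_range
  exact List.filter_congr (fun g _ => pvPointwise (PySem.Int.toChars g))
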